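-- pv_equiv track=rewrite | github.com/RVIA-REST/RVIASA | src/python-scripts/recovery.py | group_by_file_name
-- ===== SOURCE A (Python) =====
-- def group_by_file_name(info):
--     groups = {}
--     for element in info:
--         file_name = element["File Name"]
--         if file_name in groups:
--             groups[file_name].append(element)
--         else:
--             groups[file_name] = [element]
--
--     final_groups = []
--     for group in groups:
--         total_des = []
--         for vul in groups[group]:
--             total_des.append(vul['Description'])
--
--         final_groups.append(
--             {
--                 'File Name': group,
--                 'Description': ' '.join(total_des)  # Cambiado de '\n' a ' ' para juntar las descripciones en una sola línea
--             }
--         )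
--
--     return final_groups
-- ===== SOURCE B (Python) =====
-- def group_by_file_name(info):
--     # No grouping structure at all: emit one row per FIRST occurrence of a
--     # file name, collecting that name's descriptions by rescanning info.
--     result = []
--     seen = []
--     for element in info:
--         name = element["File Name"]
--         if name in seen:
--             continue
--         seen.append(name)
--         result.append({
--             'File Name': name,
--             'Description': ' '.join(e['Description'] for e in info
--                                     if e['File Name'] == name),
--         })
--     return result
-- ===== Notes on version B (the rewrite author's own statement) =====
-- stated objective: alternative
-- what changed: B drops A's dict-of-groups entirely: it walks info once with a seen-list, and at each first occurrence of a file name rescans the whole list to join that name's descriptions (nested-scan algorithm, O(n^2), vs A's hash grouping plus extraction pass).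
import Mathlib
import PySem

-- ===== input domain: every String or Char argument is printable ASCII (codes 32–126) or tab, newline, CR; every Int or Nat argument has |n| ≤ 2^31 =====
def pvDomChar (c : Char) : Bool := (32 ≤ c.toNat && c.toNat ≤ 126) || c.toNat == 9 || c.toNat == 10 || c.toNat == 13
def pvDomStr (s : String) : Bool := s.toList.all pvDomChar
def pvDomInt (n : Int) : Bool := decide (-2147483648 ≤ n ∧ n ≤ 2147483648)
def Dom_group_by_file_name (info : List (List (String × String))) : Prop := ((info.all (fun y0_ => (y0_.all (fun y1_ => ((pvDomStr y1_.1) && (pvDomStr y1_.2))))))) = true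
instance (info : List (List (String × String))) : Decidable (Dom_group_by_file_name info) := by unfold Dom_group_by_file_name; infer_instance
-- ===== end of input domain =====

-- B replaces A's dict-of-groups with a seen-list + nested rescan per first occurrence; equivalence of the RETURN value is proved under Pre_ (both keys present in every element).

-- ===== PORT A =====
-- element["Key"]: dict subscript; Pre_ guarantees the key is present, so the default is never returned inside Pre_.
def elGet (el : List (String × String)) (k : String) : String :=
  (PySem.Dict.mk el).getD k ""

def group_by_file_name (info : List (List (String × String))) : List (List (String × String)) :=
  let groups : PySem.Dict String (List (List (String × String))) :=
    info.foldl (fun g element =>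
      let fn := elGet element "File Name"
      if g.contains fn then g.modify fn [] (fun l => l ++ [element])
      else g.insert fn [element]) PySem.Dict.empty
  groups.items.foldl (fun acc kv =>
      let total_des := kv.2.foldl (fun l vul => l ++ [elGet vul "Description"]) []
      acc ++ [[("File Name", kv.1), ("Description", PySem.Str.join " " total_des)]]) []

-- ===== PORT B =====
def group_by_file_name_alt (info : List (List (String × String))) : List (List (String × String)) :=
  (info.foldl (fun (st : List (List (String × String)) × List String) element =>
      let name := elGet element "File Name"
      if st.2.contains name then st
      else
        (st.1 ++ [[("File Name", name),
            ("Description", PySem.Str.join " "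
              ((info.filter (fun e => elGet e "File Name" == name)).map
                (fun e => elGet e "Description")))]],
         st.2 ++ [name]))
    ([], [])).1

-- ===== PRECONDITION & SPEC =====
-- Pre_ excludes exactly the inputs on which Python A raises KeyError: some element lacking "File Name" or "Description".
def Pre_group_by_file_name (info : List (List (String × String))) : Prop :=
  ∀ el ∈ info, (PySem.Dict.mk el).contains "File Name" = true ∧ (PySem.Dict.mk el).contains "Description" = true
instance (info : List (List (String × String))) : Decidable (Pre_group_by_file_name info) := by unfold Pre_group_by_file_name; infer_instance

def pvWitness_group_by_file_name : (List (List (String × String))) :=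
  [[("File Name", "a.py"), ("Description", "bad")], [("File Name", "a.py"), ("Description", "worse")]]

def Spec_group_by_file_name (info : List (List (String × String))) (out : List (List (String × String))) : Prop := out = group_by_file_name_alt info
instance (info : List (List (String × String))) (out : List (List (String × String))) : Decidable (Spec_group_by_file_name info out) := by unfold Spec_group_by_file_name; infer_instance

-- ===== CLAIM (what is proved, stated in full; the proofs are below) =====
def Claim_equal_group_by_file_name : Prop := ∀ (info : List (List (String × String))), Dom_group_by_file_name info → Pre_group_by_file_name info → Spec_group_by_file_name info (group_by_file_name info)

-- ===== LEMMAS AND PROOFS =====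

-- the elements of info carrying file name k, and the rendered output row for k
def pvMatches (info : List (List (String × String))) (k : String) : List (List (String × String)) :=
  info.filter (fun e => elGet e "File Name" == k)

def pvRow (info : List (List (String × String))) (k : String) : List (String × String) :=
  [("File Name", k), ("Description", PySem.Str.join " "
      ((pvMatches info k).map (fun e => elGet e "Description")))]

-- first-occurrence list of file names (the common spine of both programs)
def pvKeys (l : List (List (String × String))) (acc : List String) : List String :=
  l.foldl (fun ks e => if elGet e "File Name" ∈ ks then ks else ks ++ [elGet e "File Name"]) acc

theorem pvKeys_append (l l' : List (List (String × String))) (acc : List String) :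
    pvKeys (l ++ l') acc = pvKeys l' (pvKeys l acc) := by
  simp [pvKeys, List.foldl_append]

theorem pvKeys_cons (e : List (String × String)) (t : List (List (String × String))) (acc : List String) :
    pvKeys (e :: t) acc = pvKeys t (if elGet e "File Name" ∈ acc then acc else acc ++ [elGet e "File Name"]) := rfl

theorem pvKeys_sub (l : List (List (String × String))) (acc : List String) :
    ∀ x ∈ acc, x ∈ pvKeys l acc := by
  induction l generalizing acc with
  | nil => simp [pvKeys]
  | cons e t ih =>
    intro x hx
    rw [pvKeys_cons]
    by_cases h : elGet e "File Name" ∈ acc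
    · rw [if_pos h]; exact ih acc x hx
    · rw [if_neg h]; exact ih _ x (by simp [hx])

theorem pvKeys_mem (l : List (List (String × String))) (acc : List String) :
    ∀ e ∈ l, elGet e "File Name" ∈ pvKeys l acc := by
  induction l generalizing acc with
  | nil => simp
  | cons e t ih =>
    intro x hx
    rw [pvKeys_cons]
    rcases List.mem_cons.mp hx with hx' | hx'
    · subst hx'
      by_cases h : elGet x "File Name" ∈ acc
      · rw [if_pos h]; exact pvKeys_sub t acc _ h
      · rw [if_neg h]; exact pvKeys_sub t _ _ (by simp)
    · exact ih _ x hx' 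

theorem pvKeys_nodup (l : List (List (String × String))) (acc : List String) (h : acc.Nodup) :
    (pvKeys l acc).Nodup := by
  induction l generalizing acc with
  | nil => simpa [pvKeys]
  | cons e t ih =>
    rw [pvKeys_cons]
    by_cases hc : elGet e "File Name" ∈ acc
    · rw [if_pos hc]; exact ih acc h
    · rw [if_neg hc]
      refine ih _ (List.nodup_append.mpr ⟨h, List.nodup_singleton _, fun a ha b hb => ?_⟩)
      rw [List.mem_singleton] at hb
      exact fun he => hc ((he.trans hb) ▸ ha)

theorem pvMatches_nil_of_not_mem (info : List (List (String × String))) (k : String)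
    (h : k ∉ pvKeys info []) : pvMatches info k = [] := by
  rw [pvMatches, List.filter_eq_nil_iff]
  intro e he
  simp only [beq_iff_eq]
  intro hk
  exact h (hk ▸ pvKeys_mem info [] e he)

-- A's grouping dict, characterized
theorem pvA_items (info : List (List (String × String))) :
    (info.foldl (fun g element =>
        let fn := elGet element "File Name"
        if g.contains fn then g.modify fn [] (fun l => l ++ [element])
        else g.insert fn [element]) PySem.Dict.empty).items
      = (pvKeys info []).map (fun k => (k, pvMatches info k)) := by
  induction info using List.reverseRecOn with
  | nil => rfl
  | append_singleton info el ih =>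
    rw [List.foldl_append, List.foldl_cons, List.foldl_nil]
    set G := info.foldl (fun g element =>
        let fn := elGet element "File Name"
        if g.contains fn then g.modify fn [] (fun l => l ++ [element])
        else g.insert fn [element]) PySem.Dict.empty with hG
    set name := elGet el "File Name" with hname
    have hkeys : G.keys = pvKeys info [] := by
      show G.items.map Prod.fst = _
      rw [ih]; simp [Function.comp_def]
    have hnd : G.keys.Nodup := by rw [hkeys]; exact pvKeys_nodup info [] (by simp)
    have hcontains : G.contains name = decide (name ∈ pvKeys info []) := by
      rw [PySem.Dict.contains_eq_decide_mem_keys, hkeys]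
    have hmatches : ∀ k, pvMatches (info ++ [el]) k
        = pvMatches info k ++ (if name = k then [el] else []) := by
      intro k
      rw [pvMatches, pvMatches, List.filter_append]
      congr 1
      by_cases h : name = k <;> simp [List.filter_nil, ← hname, h]
    have hkeys' : pvKeys (info ++ [el]) []
        = if name ∈ pvKeys info [] then pvKeys info []
          else pvKeys info [] ++ [name] := by
      rw [pvKeys_append, pvKeys_cons]
      split_ifs <;> rfl
    show (if G.contains name then G.modify name [] (fun l => l ++ [el]) else G.insert name [el]).items
      = List.map (fun k => (k, pvMatches (info ++ [el]) k)) (pvKeys (info ++ [el]) [])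
    by_cases hc : name ∈ pvKeys info []
    · rw [hcontains]
      simp only [hc, decide_true, if_true]
      have hgetD : G.getD name [] = pvMatches info name := by
        exact PySem.Dict.getD_of_mem_items _
          (by rw [ih]; exact List.mem_map.mpr ⟨name, hc, rfl⟩) hnd []
      show (G.insert name ((fun l => l ++ [el]) (G.getD name []))).items = _
      rw [PySem.Dict.items_insert_of_contains _ _ (by rw [hcontains]; simpa using hc), ih,
        hkeys', if_pos hc, List.map_map]
      apply List.map_congr_left
      intro k _
      by_cases hk : k = name
      · subst hk; simp [hmatches, hgetD]
      · have h1 : (k == name) = false := by simp [hk]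
        simp only [Function.comp_apply, h1, Bool.false_eq_true, if_false, hmatches k]
        rw [if_neg (fun h => hk h.symm), List.append_nil]
    · rw [hcontains]
      simp only [hc, decide_false, Bool.false_eq_true, if_false]
      rw [PySem.Dict.items_insert_of_not_contains _ _ (by rw [hcontains]; simpa using hc),
        ih, hkeys', if_neg hc]
      rw [List.map_append]
      congr 1
      · apply List.map_congr_left
        intro k hk
        have h2 : name ≠ k := fun h => hc (h ▸ hk)
        simp [hmatches k, h2]
      · simp [hmatches name, pvMatches_nil_of_not_mem info name hc]

-- B's fold, characterized
theorem pvB_fold (info : List (List (String × String))) :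
    ∀ (l : List (List (String × String))) (seen : List String),
    (l.foldl (fun (st : List (List (String × String)) × List String) element =>
        let name := elGet element "File Name"
        if st.2.contains name then st
        else (st.1 ++ [pvRow info name], st.2 ++ [name]))
      (seen.map (pvRow info), seen))
    = ((pvKeys l seen).map (pvRow info), pvKeys l seen) := by
  intro l
  induction l with
  | nil => intro seen; rfl
  | cons e t ih =>
    intro seen
    rw [List.foldl_cons, pvKeys_cons]
    by_cases h : elGet e "File Name" ∈ seen
    · have hb : seen.contains (elGet e "File Name") = true := by
        simpa [List.contains_eq_mem] using h
      simp only [hb, if_pos]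
      rw [if_pos h]
      exact ih seen
    · have hb : seen.contains (elGet e "File Name") = false := by
        simpa [List.contains_eq_mem] using h
      simp only [hb, Bool.false_eq_true, if_false]
      rw [if_neg h]
      have := ih (seen ++ [elGet e "File Name"])
      rw [List.map_append, List.map_cons, List.map_nil] at this
      exact this

-- ===== VERDICT (by name: the statement is the Claim_ definition above) =====
theorem group_by_file_name_spec : Claim_equal_group_by_file_name := by
  intro info _ _
  show (info.foldl (fun g element =>
        let fn := elGet element "File Name"
        if g.contains fn then g.modify fn [] (fun l => l ++ [element])
        else g.insert fn [element]) PySem.Dict.empty).items.foldl (fun acc kv =>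
      acc ++ [[("File Name", kv.1), ("Description", PySem.Str.join " "
        (kv.2.foldl (fun l vul => l ++ [elGet vul "Description"]) []))]]) []
    = (info.foldl (fun (st : List (List (String × String)) × List String) element =>
        let name := elGet element "File Name"
        if st.2.contains name then st
        else (st.1 ++ [pvRow info name], st.2 ++ [name]))
      ((List.nil).map (pvRow info), [])).1
  rw [pvB_fold info info [], pvA_items info]
  rw [PySem.List.foldl_append_singleton_eq_map, List.map_map, List.nil_append]
  apply List.map_congr_left
  intro k _
  simp only [Function.comp_apply]
  rw [PySem.List.foldl_append_singleton_eq_map (fun vul => elGet vul "Description") (pvMatches info k) []]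
  simp [pvRow]
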